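-- pv_equiv track=rewrite | github.com/Kawser-nerd/CLCDSA | Source Codes/CodeJamData/14/42/17.py | solve
-- ===== SOURCE A (Python) =====
-- def solve(N, A):
--     """ solve the problem """
--
--     count = 0
--     while A:
--         size = len(A)
--         if size == 1: break
--         m = min(A)
--         i = A.index(m)
--         if i < size - i - 1:
--             count += i
--         else:
--             count += size - i - 1
--         A.pop(i)
--
--     return count
-- ===== SOURCE B (Python) =====
-- def solve(N, A):
--     """Single left-to-right pass, no mutation: the element at each position
--     contributes min(#{earlier elements strictly greater}, #{later elements >=}),
--     because removing strictly smaller (or equal-and-earlier) elements first never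
--     changes those two counts for the elements still present.
--     (Unlike A, this does not mutate the argument list; equivalence is about the
--     return value.)"""
--     total = 0
--     seen = []
--     rest = list(A)
--     while rest:
--         x = rest.pop(0)
--         total += min(sum(1 for y in seen if y > x),
--                      sum(1 for y in rest if y >= x))
--         seen.append(x)
--     return total
-- ===== Notes on version B (the rewrite author's own statement) =====
-- stated objective: alternative
-- what changed: Replaces the destructive repeated-extract-min loop (find min, take min(i,size-1-i), pop, repeat) by a single non-mutating left-to-right pass in which each position contributes min(#earlier strictly-greater elements, #later greater-or-equal elements), which is proved equal to the whole removal process.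
import Mathlib
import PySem

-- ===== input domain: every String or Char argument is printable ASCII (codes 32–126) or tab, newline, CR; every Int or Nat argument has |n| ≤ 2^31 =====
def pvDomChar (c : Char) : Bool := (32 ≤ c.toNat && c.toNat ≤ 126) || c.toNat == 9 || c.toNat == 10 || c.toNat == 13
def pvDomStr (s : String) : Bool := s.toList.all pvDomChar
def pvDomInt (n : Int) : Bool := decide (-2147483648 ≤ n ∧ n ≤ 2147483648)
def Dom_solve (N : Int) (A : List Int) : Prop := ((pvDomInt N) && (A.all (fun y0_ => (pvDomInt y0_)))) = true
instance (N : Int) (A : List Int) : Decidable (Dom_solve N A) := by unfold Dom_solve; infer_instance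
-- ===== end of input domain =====

-- B replaces A's destructive repeated-extract-min loop by one non-mutating left-to-right
-- pass (each position contributes min(#earlier strictly-greater, #later >=)); A mutates its
-- argument list (pops all but one element) while B does not — the equivalence proved here is
-- about the RETURN value only.


-- ===== PORT A =====
-- while A: size=len(A); if size==1: break; m=min(A); i=A.index(m);
-- count += i if i < size-i-1 else size-i-1; A.pop(i)
-- (the .getD defaults are unreachable: A is nonempty at min/index/pop)
def solveLoopA (A : List Int) (count : Int) : Int :=
  if A = [] then count
  else if A.length = 1 then count
  else
    let m := (PySem.List.min? A (fun x => x)).getD 0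
    let i := (PySem.List.index? A m).getD 0
    let rest := ((PySem.List.pop? A (i : Int)).map (fun r => r.2)).getD []
    solveLoopA rest (count +
      (if (i : Int) < (A.length : Int) - (i : Int) - 1 then (i : Int)
       else (A.length : Int) - (i : Int) - 1))
termination_by A.length
decreasing_by
  rename_i hne _
  cases hp : PySem.List.pop? A (((PySem.List.index? A ((PySem.List.min? A (fun x => x)).getD 0)).getD 0 : Nat) : Int) with
  | none => simp only [hp, Option.map_none, Option.getD_none, List.length_nil]
            cases A with | nil => exact absurd rfl hne | cons a t => simp
  | some r => have := PySem.List.length_of_pop?_eq_some A hp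
              simp only [hp, Option.map_some, Option.getD_some]
              omega

def solve (N : Int) (A : List Int) : Int := solveLoopA A 0

-- ===== PORT B =====
-- while rest: x = rest.pop(0); total += min(#{y in seen : y > x}, #{y in rest : y >= x}); seen.append(x)
def solveAltLoop (seen rest : List Int) (total : Int) : Int :=
  match rest with
  | [] => total
  | x :: rs =>
    solveAltLoop (seen ++ [x]) rs
      (total + min ((seen.filter (fun y => decide (y > x))).length : Int)
                   ((rs.filter (fun y => decide (y ≥ x))).length : Int))

def solve_alt (N : Int) (A : List Int) : Int := solveAltLoop [] A 0

-- ===== PRECONDITION & SPEC =====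
def Spec_solve (N : Int) (A : List Int) (out : Int) : Prop := out = solve_alt N A
instance (N : Int) (A : List Int) (out : Int) : Decidable (Spec_solve N A out) := by unfold Spec_solve; infer_instance

-- ===== CLAIM (what is proved, stated in full; the proofs are below) =====
def Claim_equal_solve : Prop := ∀ (N : Int) (A : List Int), Dom_solve N A → Spec_solve N A (solve N A)

-- ===== LEMMAS AND PROOFS =====

-- B's accumulated prefix only matters through the strictly-greater counts: an element m
-- that is ≤ every remaining element can be dropped from anywhere inside the prefix.
theorem altLoop_prefix_drop (rest : List Int) : ∀ (pre1 pre2 : List Int) (m t : Int),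
    (∀ x ∈ rest, m ≤ x) →
    solveAltLoop (pre1 ++ m :: pre2) rest t = solveAltLoop (pre1 ++ pre2) rest t := by
  induction rest with
  | nil => intro pre1 pre2 m t _; rfl
  | cons x rs ih =>
    intro pre1 pre2 m t h
    have hmx : ¬ (m > x) := not_lt.mpr (h x (List.mem_cons_self))
    show solveAltLoop ((pre1 ++ m :: pre2) ++ [x]) rs _ = solveAltLoop ((pre1 ++ pre2) ++ [x]) rs _
    have e1 : (pre1 ++ m :: pre2) ++ [x] = pre1 ++ m :: (pre2 ++ [x]) := by simp
    have e2 : (pre1 ++ pre2) ++ [x] = pre1 ++ (pre2 ++ [x]) := by simp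
    rw [e1, e2, ih pre1 (pre2 ++ [x]) m _ (fun y hy => h y (List.mem_cons_of_mem _ hy))]
    congr 2
    simp [List.filter_append, List.filter_cons, hmx]

-- Removing a first minimum m (strictly below everything before it, ≤ everything after it)
-- from the remaining list costs exactly min(left-count, right-count).
theorem altLoop_pop (P : List Int) : ∀ (pre Q : List Int) (m t : Int),
    (∀ x ∈ P, m < x) → (∀ x ∈ Q, m ≤ x) →
    solveAltLoop pre (P ++ m :: Q) t =
      solveAltLoop pre (P ++ Q)
        (t + min ((((pre ++ P).filter (fun y => decide (y > m))).length : Int))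
                 (((Q.filter (fun y => decide (y ≥ m))).length : Int))) := by
  induction P with
  | nil =>
    intro pre Q m t _ hQ
    show solveAltLoop (pre ++ [m]) Q _ = _
    rw [altLoop_prefix_drop Q pre [] m _ hQ]
    simp
  | cons a P' ih =>
    intro pre Q m t hP hQ
    have hma : m < a := hP a List.mem_cons_self
    have hfe : ((P' ++ m :: Q).filter (fun y => decide (y ≥ a))) =
               ((P' ++ Q).filter (fun y => decide (y ≥ a))) := by
      simp [List.filter_append, List.filter_cons, not_le.mpr hma]
    show solveAltLoop (pre ++ [a]) (P' ++ m :: Q) _ = solveAltLoop (pre ++ [a]) (P' ++ Q) _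
    simp only [List.append_eq]
    rw [hfe, ih (pre ++ [a]) Q m _ (fun x hx => hP x (List.mem_cons_of_mem _ hx)) hQ]
    have e2 : (pre ++ [a]) ++ P' = pre ++ a :: P' := by simp
    rw [e2]
    congr 1
    omega

theorem eraseIdx_mid (P Q : List Int) (m : Int) : (P ++ m :: Q).eraseIdx P.length = P ++ Q := by
  induction P with
  | nil => rfl
  | cons a P ih => simpa [List.eraseIdx] using ih

theorem loopA_eq_altLoop (n : Nat) : ∀ (A : List Int), A.length ≤ n → ∀ (t : Int),
    solveLoopA A t = solveAltLoop [] A t := by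
  induction n with
  | zero =>
    intro A h t
    have : A = [] := List.eq_nil_of_length_eq_zero (Nat.le_zero.mp h)
    subst this; rw [solveLoopA]; rfl
  | succ n ih =>
    intro A hlen t
    by_cases h0 : A = []
    · subst h0; rw [solveLoopA]; rfl
    by_cases h1 : A.length = 1
    · obtain ⟨x, hx⟩ := List.length_eq_one_iff.mp h1
      subst hx
      rw [solveLoopA]
      show (if ([x] : List Int) = [] then t else if ([x] : List Int).length = 1 then t else _) = _
      norm_num [solveAltLoop]
    · obtain ⟨m, hm⟩ : ∃ m, PySem.List.min? A (fun x => x) = some m := by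
        cases hmm : PySem.List.min? A (fun x => x) with
        | none => exact absurd ((PySem.List.min?_eq_none_iff A _).mp hmm) h0
        | some m => exact ⟨m, rfl⟩
      have hmem : m ∈ A := PySem.List.min?_mem hm
      have hmin : ∀ y ∈ A, m ≤ y := PySem.List.min?_isMin hm
      obtain ⟨i, hi⟩ : ∃ i, PySem.List.index? A m = some i :=
        Option.isSome_iff_exists.mp ((PySem.List.index?_isSome_iff A m).mpr hmem)
      obtain ⟨P, Q, hA, hPlen, hmP⟩ := (PySem.List.index?_eq_some_iff A m i).mp hi
      have hilt : i < A.length := by subst hA; subst hPlen; simp only [List.length_append, List.length_cons]; omega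
      have hpop : PySem.List.pop? A (i : Int) = some (A[i], A.eraseIdx i) :=
        PySem.List.pop?_natCast A i hilt
      have herase : A.eraseIdx i = P ++ Q := by
        subst hA; subst hPlen; exact eraseIdx_mid P Q m
      have hP : ∀ x ∈ P, m < x := by
        intro x hx
        have hle : m ≤ x := hmin x (by subst hA; exact List.mem_append_left _ hx)
        rcases lt_or_eq_of_le hle with h | h
        · exact h
        · exact absurd (h ▸ hx) hmP
      have hQ : ∀ x ∈ Q, m ≤ x := fun x hx =>
        hmin x (by subst hA; exact List.mem_append_right _ (List.mem_cons_of_mem _ hx))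
      have hlen' : (P ++ Q).length ≤ n := by
        have : A.length = P.length + 1 + Q.length := by subst hA; simp only [List.length_append, List.length_cons]; omega
        simp only [List.length_append]; omega
      rw [solveLoopA, if_neg h0, if_neg h1]
      simp only [hm, hi, hpop, Option.getD_some, Option.map_some, herase]
      rw [ih (P ++ Q) hlen']
      conv_rhs => rw [hA]
      rw [altLoop_pop P [] Q m t hP hQ]
      have hfP : P.filter (fun y => decide (y > m)) = P :=
        List.filter_eq_self.mpr (fun y hy => decide_eq_true (hP y hy))
      have hfQ : Q.filter (fun y => decide (y ≥ m)) = Q :=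
        List.filter_eq_self.mpr (fun y hy => decide_eq_true (hQ y hy))
      simp only [List.nil_append, hfP, hfQ]
      congr 1
      have hAl : A.length = P.length + 1 + Q.length := by rw [hA]; simp only [List.length_append, List.length_cons]; omega
      have : i = P.length := hPlen.symm
      subst this
      rw [hAl]
      push_cast
      split_ifs <;> omega

-- ===== VERDICT (by name: the statement is the Claim_ definition above) =====
theorem solve_spec : Claim_equal_solve := by
  intro N A _
  unfold Spec_solve solve solve_alt
  exact loopA_eq_altLoop A.length A le_rfl 0
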